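-- pv_equiv track=rewrite | github.com/MieszkoMakuch/fakenews-detector | fakenews_detector/fake_fact_ai/feature.py | numOfContPunc
-- ===== SOURCE A (Python) =====
-- import string
--
-- def numOfContPunc(input):
--     res = 0;
--     state = False
--     for i in range(1, len(input)):
--         if input[i] in string.punctuation:
--             if input[i - 1] in string.punctuation:
--                 if state:
--                     pass
--                 else:
--                     state = True
--                     res += 1
--             else:
--                 state = False
--                 pass
--         else:
--             state = False
--     return res
-- ===== SOURCE B (Python) =====
-- import string
-- from itertools import groupby
--
--
-- def numOfContPunc(input):
--     # Segment the input into maximal runs of same class (punctuation / not),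
--     # then count the punctuation runs of length >= 2.
--     res = 0
--     for is_punct, group in groupby(input, key=lambda c: c in string.punctuation):
--         if is_punct and sum(1 for _ in group) >= 2:
--             res += 1
--     return res
-- ===== Notes on version B (the rewrite author's own statement) =====
-- stated objective: idiomatic
-- what changed: Replaces the index loop with a boolean state machine over adjacent character pairs by an itertools.groupby run segmentation that counts punctuation runs of length >= 2 directly.
import Mathlib
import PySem

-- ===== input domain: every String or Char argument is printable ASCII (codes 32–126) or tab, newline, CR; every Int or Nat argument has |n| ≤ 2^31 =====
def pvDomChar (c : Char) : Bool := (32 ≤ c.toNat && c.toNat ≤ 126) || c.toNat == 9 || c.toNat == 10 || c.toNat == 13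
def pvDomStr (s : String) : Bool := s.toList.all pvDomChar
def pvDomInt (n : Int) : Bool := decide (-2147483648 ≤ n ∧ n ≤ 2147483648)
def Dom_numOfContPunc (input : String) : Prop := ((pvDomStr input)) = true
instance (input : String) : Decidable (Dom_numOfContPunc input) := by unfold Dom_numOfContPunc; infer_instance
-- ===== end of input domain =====

-- B replaces A's boolean state machine over adjacent character pairs by a run
-- segmentation (itertools.groupby) that counts punctuation runs of length >= 2.


-- string.punctuation
def pvPunct : List Char := "!\"#$%&'()*+,-./:;<=>?@[\\]^_`{|}~".toList

-- 'c in string.punctuation' for a single character is list membership (exact: the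
-- tested string always has length 1, so substring containment = membership)
def pvIsPunc (c : Char) : Bool := pvPunct.contains c

-- ===== PORT A =====
def numOfContPunc (input : String) : Int :=
  (((PySem.List.pyRange 1 (PySem.Str.len input)).foldl
    (fun (acc : Int × Bool) (i : Int) =>
      if pvIsPunc (PySem.List.pyGetD input.toList i ' ') then
        if pvIsPunc (PySem.List.pyGetD input.toList (i - 1) ' ') then
          if acc.2 then acc else (acc.1 + 1, true)
        else (acc.1, false)
      else (acc.1, false))
    (0, false)) : Int × Bool).1

-- ===== PORT B =====
-- one groupby group: length of the leading run whose key (pvIsPunc) equals p, and the rest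
def pvTakeRun (p : Bool) : List Char → Nat × List Char
  | [] => (0, [])
  | c :: rest =>
    if pvIsPunc c = p then
      let r := pvTakeRun p rest
      (r.1 + 1, r.2)
    else (0, c :: rest)

theorem pvTakeRun_len (p : Bool) (t : List Char) : (pvTakeRun p t).2.length ≤ t.length := by
  induction t with
  | nil => simp [pvTakeRun]
  | cons c rest ih =>
    simp only [pvTakeRun]
    split
    · exact Nat.le_succ_of_le ih
    · simp

-- iterate groupby: consume one group at a time, count it iff punctuation and length ≥ 2
def pvCountRuns : List Char → Int
  | [] => 0
  | c :: rest =>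
    let r := pvTakeRun (pvIsPunc c) rest
    (if pvIsPunc c && decide (r.1 + 1 ≥ 2) then 1 else 0) + pvCountRuns r.2
termination_by t => t.length
decreasing_by
  simpa using Nat.lt_succ_of_le (pvTakeRun_len (pvIsPunc c) rest)

def numOfContPunc_alt (input : String) : Int :=
  pvCountRuns input.toList

-- ===== PRECONDITION & SPEC =====
def Spec_numOfContPunc (input : String) (out : Int) : Prop := out = numOfContPunc_alt input
instance (input : String) (out : Int) : Decidable (Spec_numOfContPunc input out) := by unfold Spec_numOfContPunc; infer_instance

-- ===== CLAIM (what is proved, stated in full; the proofs are below) =====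
def Claim_equal_numOfContPunc : Prop := ∀ (input : String), Dom_numOfContPunc input → Spec_numOfContPunc input (numOfContPunc input)

-- ===== LEMMAS AND PROOFS =====

-- A's loop body as a function of the two adjacent characters
def pvStep (acc : Int × Bool) (prev cur : Char) : Int × Bool :=
  if pvIsPunc cur then
    if pvIsPunc prev then
      if acc.2 then acc else (acc.1 + 1, true)
    else (acc.1, false)
  else (acc.1, false)

-- A's loop as a structural recursion over the characters after the first
def pvLoop (prev : Char) : List Char → Int × Bool → Int × Bool
  | [], acc => acc
  | c :: t, acc => pvLoop c t (pvStep acc prev c)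

-- the contribution of the remaining characters, given (is prev punctuation, state)
def pvG (pp st : Bool) : List Char → Int
  | [] => 0
  | c :: t =>
    if pvIsPunc c then
      if pp then
        if st then pvG true true t else 1 + pvG true true t
      else pvG true false t
    else pvG false false t

theorem pvLoop_fst (t : List Char) : ∀ (prev : Char) (res : Int) (st : Bool),
    (pvLoop prev t (res, st)).1 = res + pvG (pvIsPunc prev) st t := by
  induction t with
  | nil => intro prev res st; simp [pvLoop, pvG]
  | cons c t ih =>
    intro prev res st
    simp only [pvLoop, pvStep, pvG]
    by_cases hc : pvIsPunc c <;> by_cases hp : pvIsPunc prev <;>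
      cases st <;> simp [hc, hp, ih] <;> try ring

-- the index fold of A equals pvLoop, stated with an arbitrary prefix u of the string
theorem pvFold_eq_pvLoop (t : List Char) : ∀ (u : List Char) (prev : Char) (acc : Int × Bool),
    (PySem.List.pyRange ((u.length : Int) + 1) ((u.length : Int) + 1 + t.length)).foldl
      (fun (acc : Int × Bool) (i : Int) =>
        if pvIsPunc (PySem.List.pyGetD (u ++ prev :: t) i ' ') then
          if pvIsPunc (PySem.List.pyGetD (u ++ prev :: t) (i - 1) ' ') then
            if acc.2 then acc else (acc.1 + 1, true)
          else (acc.1, false)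
        else (acc.1, false)) acc
    = pvLoop prev t acc := by
  induction t with
  | nil =>
    intro u prev acc
    rw [PySem.List.pyRange_one_eq_nil (by simp)]
    simp [pvLoop]
  | cons c t ih =>
    intro u prev acc
    rw [PySem.List.pyRange_one_cons (by push_cast [List.length_cons]; omega)]
    simp only [List.foldl_cons]
    have h1 : PySem.List.pyGetD (u ++ prev :: c :: t) ((u.length : Int) + 1) ' ' = c := by
      have : ((u.length : Int) + 1) = ((u.length + 1 : Nat) : Int) := by push_cast; ring
      rw [this, PySem.List.pyGetD_natCast]
      simp [List.getD]
    have h2 : PySem.List.pyGetD (u ++ prev :: c :: t) ((u.length : Int) + 1 - 1) ' ' = prev := by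
      have : ((u.length : Int) + 1 - 1) = ((u.length : Nat) : Int) := by ring
      rw [this, PySem.List.pyGetD_natCast]
      simp [List.getD]
    rw [h1, h2]
    have h3 : (u ++ prev :: c :: t) = ((u ++ [prev]) ++ c :: t) := by simp
    have h4 : ((u.length : Int) + 1 + 1) = (((u ++ [prev]).length : Int) + 1) := by
      simp
    have h5 : ((u.length : Int) + 1 + (c :: t).length)
        = (((u ++ [prev]).length : Int) + 1 + t.length) := by
      simp; ring
    rw [h3, h4, h5, ih (u ++ [prev]) c]
    simp [pvLoop, pvStep]

-- unfolding equations of the (well-founded) run counter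
theorem pvCountRuns_nil : pvCountRuns [] = 0 := by
  rw [pvCountRuns]

theorem pvCountRuns_cons (c : Char) (t : List Char) :
    pvCountRuns (c :: t)
      = (if pvIsPunc c && decide ((pvTakeRun (pvIsPunc c) t).1 + 1 ≥ 2) then 1 else 0)
        + pvCountRuns (pvTakeRun (pvIsPunc c) t).2 := by
  rw [pvCountRuns]

-- run-segmentation versus the state machine: three mutually dependent facts, one induction
theorem pvRuns_g (t : List Char) :
    (pvG true true t = pvCountRuns (pvTakeRun true t).2)
    ∧ (pvG false false t = pvCountRuns (pvTakeRun false t).2)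
    ∧ (pvG true false t
        = (if (pvTakeRun true t).1 ≥ 1 then 1 else 0) + pvCountRuns (pvTakeRun true t).2) := by
  induction t with
  | nil => refine ⟨?_, ?_, ?_⟩ <;> simp [pvG, pvTakeRun, pvCountRuns_nil]
  | cons c t ih =>
    obtain ⟨ih1, ih2, ih3⟩ := ih
    by_cases hc : pvIsPunc c
    · refine ⟨?_, ?_, ?_⟩
      · simp [pvG, pvTakeRun, hc, ih1]
      · -- the non-punctuation run stops before c; counting restarts on the punctuation run
        have h2 : pvTakeRun false (c :: t) = (0, c :: t) := by simp [pvTakeRun, hc]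
        simp only [pvG, hc, if_true, Bool.false_eq_true, if_false, h2]
        rw [pvCountRuns_cons, hc, ih3]
        simp only [Bool.true_and, decide_eq_true_eq]
        split_ifs <;> omega
      · simp only [pvG, pvTakeRun, hc, if_true]
        rw [ih1]
        simp
    · rw [Bool.not_eq_true] at hc
      refine ⟨?_, ?_, ?_⟩
      · have h2 : pvTakeRun true (c :: t) = (0, c :: t) := by simp [pvTakeRun, hc]
        simp only [pvG, hc, Bool.false_eq_true, if_false, h2]
        rw [pvCountRuns_cons, hc, ih2]
        simp
      · simp [pvG, pvTakeRun, hc, ih2]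
      · have h2 : pvTakeRun true (c :: t) = (0, c :: t) := by simp [pvTakeRun, hc]
        simp only [pvG, hc, Bool.false_eq_true, if_false, h2]
        rw [pvCountRuns_cons, hc, ih2]
        simp

theorem pvG_eq_countRuns (c : Char) (t : List Char) :
    pvG (pvIsPunc c) false t = pvCountRuns (c :: t) := by
  rw [pvCountRuns_cons]
  by_cases hc : pvIsPunc c
  · rw [hc, (pvRuns_g t).2.2]
    simp only [Bool.true_and, decide_eq_true_eq]
    split_ifs <;> omega
  · rw [Bool.not_eq_true] at hc
    rw [hc, (pvRuns_g t).2.1]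
    simp

-- ===== VERDICT (by name: the statement is the Claim_ definition above) =====
theorem numOfContPunc_spec : Claim_equal_numOfContPunc := by
  intro input _
  unfold Spec_numOfContPunc numOfContPunc numOfContPunc_alt
  rw [PySem.Str.len_eq]
  cases hs : input.toList with
  | nil =>
    rw [PySem.List.pyRange_one_eq_nil (by simp)]
    simp [pvCountRuns_nil]
  | cons c t =>
    have hfold := pvFold_eq_pvLoop t [] c (0, false)
    simp only [List.length_nil, Nat.cast_zero, List.nil_append, zero_add] at hfold
    have hl : ((c :: t).length : Int) = 1 + t.length := by
      push_cast [List.length_cons]; ring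
    rw [hl]
    refine Eq.trans (congrArg Prod.fst hfold) ?_
    rw [pvLoop_fst, pvG_eq_countRuns]
    simp
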